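-- pv_equiv track=rewrite | github.com/DiGarOn/pet | learn_smth_new/all_question/3.py | count
-- ===== SOURCE A (Python) =====
-- def count(li: list):
--     res = 0
--     prev, cur = 0, 0
--     for i in li:
--         if i == 'U':
--             prev, cur = cur, cur + 1
--         else:
--             prev, cur = cur, cur - 1
--         if prev == 0 and cur < 0:
--            res += 1
--     return res
-- ===== SOURCE B (Python) =====
-- def count(li: list):
--     # Excursion-skipping: the walk splits into maximal excursions above or
--     # below sea level; count an excursion at its first step iff it goes down.
--     res = 0
--     i, n = 0, len(li)
--     while i < n:
--         down = li[i] != 'U'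
--         if down:
--             res += 1
--         depth = 1
--         i += 1
--         while i < n and depth > 0:
--             depth += 1 if (li[i] != 'U') == down else -1
--             i += 1
--     return res
-- ===== Notes on version B (the rewrite author's own statement) =====
-- stated objective: alternative
-- what changed: Replaces A's single pass over a running height (prev/cur registers) by nested excursion-skipping loops: the outer loop only sees sea-level positions, counts a valley when the first step goes down, and an inner matching loop skips the whole excursion using a depth counter until it returns to level 0; no running height or prefix sequence is kept.
import Mathlib
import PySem

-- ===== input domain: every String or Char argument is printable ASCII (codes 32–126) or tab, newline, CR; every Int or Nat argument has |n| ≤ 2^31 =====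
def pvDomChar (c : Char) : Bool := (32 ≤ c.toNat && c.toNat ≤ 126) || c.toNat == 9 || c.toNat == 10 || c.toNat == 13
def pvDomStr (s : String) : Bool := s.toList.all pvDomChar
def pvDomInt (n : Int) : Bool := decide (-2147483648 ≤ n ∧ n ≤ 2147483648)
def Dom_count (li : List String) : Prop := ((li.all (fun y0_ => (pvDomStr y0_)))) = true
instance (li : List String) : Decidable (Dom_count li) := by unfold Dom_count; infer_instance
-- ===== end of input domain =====

-- B: nested excursion-skipping loops (outer loop at sea level counts valleys, inner loop skips each excursion); same O(n) cost, different algorithm structure.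
-- ===== PORT A =====
def countLoopA : List String → Int → Int → Int → Int
  | [], res, _prev, _cur => res
  | i :: rest, res, _prev, cur =>
      let pc : Int × Int := if i = "U" then (cur, cur + 1) else (cur, cur - 1)
      countLoopA rest (if pc.1 = 0 ∧ pc.2 < 0 then res + 1 else res) pc.1 pc.2

def count (li : List String) : Int := countLoopA li 0 0 0

-- ===== PORT B =====
-- inner loop: 'while i < n and depth > 0: depth += 1 if (li[i] != 'U') == down else -1'
def skipExc (down : Bool) : List String → Int → List String
  | [], _ => []
  | c :: rest, d =>
      if d ≤ 0 then c :: rest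
      else skipExc down rest (d + (if (decide (c ≠ "U")) = down then 1 else -1))

theorem skipExc_length_le (down : Bool) (li : List String) : ∀ d : Int, (skipExc down li d).length ≤ li.length := by
  induction li with
  | nil => intro d; simp [skipExc]
  | cons c rest ih =>
      intro d
      simp only [skipExc]
      split
      · simp
      · exact Nat.le_trans (ih _) (Nat.le_succ _)

-- outer loop over sea-level positions
def outerB : List String → Int → Int
  | [], res => res
  | c :: rest, res =>
      let down := decide (c ≠ "U")
      outerB (skipExc down rest 1) (if down then res + 1 else res)
termination_by l _ => l.length
decreasing_by
  exact Nat.lt_succ_of_le (skipExc_length_le _ _ _)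

def count_alt (li : List String) : Int := outerB li 0

-- ===== PRECONDITION & SPEC =====
def Spec_count (li : List String) (out : Int) : Prop := out = count_alt li
instance (li : List String) (out : Int) : Decidable (Spec_count li out) := by unfold Spec_count; infer_instance

-- ===== CLAIM (what is proved, stated in full; the proofs are below) =====
def Claim_equal_count : Prop := ∀ (li : List String), Dom_count li → Spec_count li (count li)

-- ===== LEMMAS AND PROOFS =====
-- g li h = number of 0 → negative height transitions of the walk starting at height h
def gHts : List String → Int → Int
  | [], _ => 0
  | c :: rest, h =>
      (if h = 0 ∧ h + (if c = "U" then 1 else -1) < 0 then 1 else 0) +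
        gHts rest (h + (if c = "U" then 1 else -1))

theorem countLoopA_eq (li : List String) :
    ∀ (res cur prev : Int), countLoopA li res prev cur = res + gHts li cur := by
  induction li with
  | nil => intro res cur prev; simp [countLoopA, gHts]
  | cons c rest ih =>
      intro res cur prev
      by_cases h : c = "U" <;>
        simp [countLoopA, gHts, h, ih, sub_eq_add_neg] <;>
        split_ifs <;> omega

theorem gHts_skipExc (li : List String) : ∀ (d : Int) (down : Bool), 0 ≤ d →
    gHts (skipExc down li d) 0 = gHts li (if down then -d else d) := by
  induction li with
  | nil => intro d down _; simp [skipExc, gHts]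
  | cons c rest ih =>
      intro d down hd
      by_cases hz : d ≤ 0
      · have : d = 0 := le_antisymm hz hd
        subst this
        simp [skipExc]
      · have hd1 : 1 ≤ d := by omega
        have hrec : skipExc down (c :: rest) d =
            skipExc down rest (d + (if (decide (c ≠ "U")) = down then 1 else -1)) := by
          simp [skipExc, hz]
        rw [hrec]
        have hd' : 0 ≤ d + (if (decide (c ≠ "U")) = down then 1 else -1) := by
          split_ifs <;> omega
        rw [ih _ down hd']
        by_cases hc : c = "U" <;> cases down <;>
          simp [gHts, hc, add_comm] <;> omega

theorem outerB_eq : ∀ (n : Nat) (li : List String) (res : Int), li.length ≤ n →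
    outerB li res = res + gHts li 0 := by
  intro n
  induction n with
  | zero =>
      intro li res hlen
      have : li = [] := List.eq_nil_of_length_eq_zero (Nat.le_zero.mp hlen)
      subst this; simp [outerB, gHts]
  | succ n ih =>
      intro li res hlen
      cases li with
      | nil => simp [outerB, gHts]
      | cons c rest =>
          rw [outerB]
          have hskip : (skipExc (decide (c ≠ "U")) rest 1).length ≤ n :=
            Nat.le_trans (skipExc_length_le _ _ _) (Nat.le_of_succ_le_succ hlen)
          rw [ih _ _ hskip]
          have := gHts_skipExc rest 1 (decide (c ≠ "U")) (by omega)
          by_cases hc : c = "U" <;> simp [hc] at this ⊢ <;>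
            simp [gHts, hc, this] <;> omega

-- ===== VERDICT (by name: the statement is the Claim_ definition above) =====
theorem count_spec : Claim_equal_count := by
  intro li _
  unfold Spec_count count count_alt
  rw [countLoopA_eq li 0 0 0, outerB_eq li.length li 0 (Nat.le_refl _)]
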